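-- pv_equiv track=rewrite | github.com/ternava/x264 | measures/all-combinations.py | indexed_combination
-- ===== SOURCE A (Python) =====
-- def indexed_combination(seq, n):
--     result = []
--     for u in seq:
--         if n & 1:
--             result.append(u)
--         n >>= 1
--         if not n:
--             break
--     return result
-- ===== SOURCE B (Python) =====
-- def indexed_combination(seq, n):
--     seq = list(seq)
--     k = len(seq)
--     result = []
--     m = n
--     while m:
--         i = (m & -m).bit_length() - 1
--         if i >= k:
--             break
--         result.append(seq[i])
--         m &= m - 1
--     return result
-- ===== Notes on version B (the rewrite author's own statement) =====
-- stated objective: alternative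
-- what changed: Instead of scanning every element of seq while shifting n, B materializes seq once and iterates only over the set bits of n, isolating each lowest set bit with m & -m and clearing it with m &= m - 1, stopping when the bit index reaches len(seq).
import Mathlib
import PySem

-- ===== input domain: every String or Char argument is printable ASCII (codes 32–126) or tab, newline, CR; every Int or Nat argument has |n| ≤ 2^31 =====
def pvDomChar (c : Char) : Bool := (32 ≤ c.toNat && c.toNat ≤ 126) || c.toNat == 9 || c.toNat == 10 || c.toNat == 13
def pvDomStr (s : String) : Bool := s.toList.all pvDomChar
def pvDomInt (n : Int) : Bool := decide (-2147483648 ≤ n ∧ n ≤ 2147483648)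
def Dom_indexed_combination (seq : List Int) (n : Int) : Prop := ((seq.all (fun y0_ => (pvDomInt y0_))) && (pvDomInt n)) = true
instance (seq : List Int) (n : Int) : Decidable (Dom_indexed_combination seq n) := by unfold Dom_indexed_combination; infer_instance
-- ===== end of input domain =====

-- B selects the elements of seq indexed by the set bits of n by walking n's lowest set bits
-- directly (alternative algorithm, not claimed faster); return values proved equal, no mutation involved.

-- ===== PORT A =====
-- the 'for u in seq' loop of A: state = (remaining seq, n, result)
def icLoopA : List Int → Int → List Int → List Int
  | [], _, result => result
  | u :: rest, n, result =>
    let result' := if PySem.Int.band n 1 ≠ 0 then result ++ [u] else result  -- if n & 1: result.append(u)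
    let n' := n >>> (1 : Nat)                                               -- n >>= 1
    if n' = 0 then result' else icLoopA rest n' result'                     -- if not n: break

def indexed_combination (seq : List Int) (n : Int) : List Int := icLoopA seq n []

-- ===== PORT B =====
-- i = (m & -m).bit_length() - 1
def icLowbit (m : Int) : Nat := PySem.Int.bitLength (PySem.Int.band m (-m)) - 1

-- the 'while m' loop of B; fuel (seq.length) only bounds the recursion: the loop appends at
-- strictly increasing indices < seq.length, so it breaks before the fuel is exhausted.
def icLoopB (seq : List Int) : Nat → Int → List Int → List Int
  | 0, _, result => result
  | fuel + 1, m, result =>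
    if m = 0 then result
    else
      let i := icLowbit m
      if seq.length ≤ i then result                                          -- if i >= k: break
      else icLoopB seq fuel (PySem.Int.band m (m - 1)) (result ++ [seq.getD i 0])

def indexed_combination_alt (seq : List Int) (n : Int) : List Int := icLoopB seq seq.length n []

-- ===== PRECONDITION & SPEC =====
def Spec_indexed_combination (seq : List Int) (n : Int) (out : List Int) : Prop := out = indexed_combination_alt seq n
instance (seq : List Int) (n : Int) (out : List Int) : Decidable (Spec_indexed_combination seq n out) := by unfold Spec_indexed_combination; infer_instance

-- ===== CLAIM (what is proved, stated in full; the proofs are below) =====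
def Claim_equal_indexed_combination : Prop := ∀ (seq : List Int) (n : Int), Dom_indexed_combination seq n → Spec_indexed_combination seq n (indexed_combination seq n)

-- ===== LEMMAS AND PROOFS =====

-- common specification: the element at each position whose bit of n is set, in order
def pvF : List Int → Int → List Int
  | [], _ => []
  | u :: r, n => (if PySem.Int.band n 1 ≠ 0 then [u] else []) ++ pvF r (n >>> (1 : Nat))

-- basic integer facts
theorem pv_band_one_emod (m : Int) : PySem.Int.band m 1 = m % 2 := by
  rw [PySem.Int.band_one]; simp [PySem.Int.mod]; rw [Int.fmod_eq_emod_of_nonneg]; omega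

theorem pv_shr1_ofNat (a : Nat) : ((a : Int) >>> (1 : Nat)) = ((a / 2 : Nat) : Int) := by
  show Int.shiftRight _ _ = _
  simp [Int.shiftRight, Nat.shiftRight_eq_div_pow]

theorem pv_shr1_negSucc (a : Nat) : (Int.negSucc a) >>> (1 : Nat) = Int.negSucc (a / 2) := by
  show Int.shiftRight _ _ = _
  simp [Int.shiftRight, Nat.shiftRight_eq_div_pow]

theorem pv_shr1_spec (m : Int) : m = 2 * (m >>> (1 : Nat)) + m % 2 := by
  cases m with
  | ofNat a => rw [Int.ofNat_eq_natCast, pv_shr1_ofNat]; omega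
  | negSucc a => rw [pv_shr1_negSucc]; simp [Int.negSucc_eq]; omega

theorem pv_shr1_two_mul (x : Int) : (2 * x) >>> (1 : Nat) = x := by
  have h := pv_shr1_spec (2 * x); omega

theorem pv_shr1_zero_iff (m : Int) : m >>> (1 : Nat) = 0 ↔ m = 0 ∨ m = 1 := by
  have h := pv_shr1_spec m
  constructor
  · intro h0; rw [h0] at h; omega
  · rintro (rfl | rfl)
    · exact pv_shr1_two_mul 0
    · decide

theorem pv_half_ne_zero (m : Int) (h0 : m ≠ 0) (h : m % 2 = 0) : m >>> (1 : Nat) ≠ 0 := by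
  rw [Ne, pv_shr1_zero_iff]; omega

-- Nat bit lemmas
theorem pv_nat_and_pred_odd (p : Nat) (h : p % 2 = 1) : p &&& (p - 1) = p - 1 := by
  apply Nat.eq_of_testBit_eq
  intro i
  cases i with
  | zero => simp [Nat.testBit_zero]; omega
  | succ i =>
      rw [Nat.testBit_and, Nat.testBit_succ, Nat.testBit_succ,
        show (p - 1) / 2 = p / 2 by omega, Bool.and_self]

theorem pv_nat_or_pred_odd (p : Nat) (h : p % 2 = 1) : (p - 1) ||| p = p := by
  apply Nat.eq_of_testBit_eq
  intro i
  cases i with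
  | zero => simp [Nat.testBit_zero]; omega
  | succ i =>
      rw [Nat.testBit_or, Nat.testBit_succ, Nat.testBit_succ,
        show (p - 1) / 2 = p / 2 by omega, Bool.or_self]

theorem pv_nat_and_pred_even (q : Nat) (h : 1 ≤ q) :
    (2 * q) &&& (2 * q - 1) = 2 * (q &&& (q - 1)) := by
  apply Nat.eq_of_testBit_eq
  intro i
  cases i with
  | zero => simp [Nat.testBit_zero]
  | succ i =>
      rw [Nat.testBit_and, Nat.testBit_succ, Nat.testBit_succ, Nat.testBit_succ,
        show 2 * q / 2 = q by omega, show (2 * q - 1) / 2 = q - 1 by omega]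
      rw [show 2 * (q &&& (q - 1)) / 2 = q &&& (q - 1) by omega, Nat.testBit_and]

theorem pv_nat_or_pred_even (q : Nat) (h : 1 ≤ q) :
    (2 * q - 1) ||| (2 * q) = 2 * ((q - 1) ||| q) + 1 := by
  apply Nat.eq_of_testBit_eq
  intro i
  cases i with
  | zero => simp [Nat.testBit_zero]; omega
  | succ i =>
      rw [Nat.testBit_or, Nat.testBit_succ, Nat.testBit_succ, Nat.testBit_succ,
        show (2 * q - 1) / 2 = q - 1 by omega, show 2 * q / 2 = q by omega]
      rw [show (2 * ((q - 1) ||| q) + 1) / 2 = (q - 1) ||| q by omega, Nat.testBit_or]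

-- band m (-m) and band m (m-1) in terms of natAbs
theorem pv_band_neg_self (m : Int) (h : m ≠ 0) :
    PySem.Int.band m (-m) = ((m.natAbs - (m.natAbs &&& (m.natAbs - 1)) : Nat) : Int) := by
  unfold PySem.Int.band
  rcases lt_or_gt_of_ne h with hm | hm
  · rw [if_neg (by omega), if_pos (by omega),
      show (-m).toNat = m.natAbs by omega, show (-m - 1).toNat = m.natAbs - 1 by omega]
  · rw [if_pos (by omega), if_neg (by omega),
      show m.toNat = m.natAbs by omega, show (-(-m) - 1).toNat = m.natAbs - 1 by omega]

theorem pv_band_pred_pos (m : Int) (h : 0 < m) :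
    PySem.Int.band m (m - 1) = ((m.natAbs &&& (m.natAbs - 1) : Nat) : Int) := by
  unfold PySem.Int.band
  rw [if_pos (by omega), if_pos (by omega),
    show m.toNat = m.natAbs by omega, show (m - 1).toNat = m.natAbs - 1 by omega]

theorem pv_band_pred_neg (m : Int) (h : m < 0) :
    PySem.Int.band m (m - 1) = -(((m.natAbs - 1) ||| m.natAbs : Nat) : Int) - 1 := by
  unfold PySem.Int.band
  rw [if_neg (by omega), if_neg (by omega),
    show (-m - 1).toNat = m.natAbs - 1 by omega, show (-(m - 1) - 1).toNat = m.natAbs by omega]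

-- step lemmas on Int
theorem pv_lowbit_pos (m : Int) (h : m ≠ 0) : 0 < PySem.Int.band m (-m) := by
  rw [pv_band_neg_self m h]
  have h1 : 1 ≤ m.natAbs := by omega
  have h2 : m.natAbs &&& (m.natAbs - 1) ≤ m.natAbs - 1 := Nat.and_le_right
  omega

theorem pv_band_neg_self_odd (m : Int) (h : m % 2 = 1) : PySem.Int.band m (-m) = 1 := by
  rw [pv_band_neg_self m (by omega)]
  have hp : m.natAbs % 2 = 1 := by omega
  rw [pv_nat_and_pred_odd _ hp]
  omega

theorem pv_clear_odd (m : Int) (h : m % 2 = 1) : PySem.Int.band m (m - 1) = m - 1 := by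
  have hp : m.natAbs % 2 = 1 := by omega
  rcases lt_or_gt_of_ne (show m ≠ 0 by omega) with hm | hm
  · rw [pv_band_pred_neg m hm, pv_nat_or_pred_odd _ hp]; omega
  · rw [pv_band_pred_pos m hm, pv_nat_and_pred_odd _ hp]; omega

theorem pv_band_neg_self_even (m : Int) (h0 : m ≠ 0) (h : m % 2 = 0) :
    PySem.Int.band m (-m) = 2 * PySem.Int.band (m >>> (1 : Nat)) (-(m >>> (1 : Nat))) := by
  have hx : m = 2 * (m >>> (1 : Nat)) := by have := pv_shr1_spec m; omega
  have hxne : m >>> (1 : Nat) ≠ 0 := pv_half_ne_zero m h0 h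
  rw [pv_band_neg_self m h0, pv_band_neg_self _ hxne]
  have hq : m.natAbs = 2 * (m >>> (1 : Nat)).natAbs := by omega
  have hq1 : 1 ≤ (m >>> (1 : Nat)).natAbs := by omega
  have h4 : m.natAbs &&& (m.natAbs - 1)
      = 2 * ((m >>> (1 : Nat)).natAbs &&& ((m >>> (1 : Nat)).natAbs - 1)) := by
    rw [hq]; exact pv_nat_and_pred_even _ hq1
  have h5 : (m >>> (1 : Nat)).natAbs &&& ((m >>> (1 : Nat)).natAbs - 1)
      ≤ (m >>> (1 : Nat)).natAbs - 1 := Nat.and_le_right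
  omega

theorem pv_clear_even (m : Int) (h0 : m ≠ 0) (h : m % 2 = 0) :
    PySem.Int.band m (m - 1) = 2 * PySem.Int.band (m >>> (1 : Nat)) ((m >>> (1 : Nat)) - 1) := by
  have hx : m = 2 * (m >>> (1 : Nat)) := by have := pv_shr1_spec m; omega
  have hxne : m >>> (1 : Nat) ≠ 0 := pv_half_ne_zero m h0 h
  have hq : m.natAbs = 2 * (m >>> (1 : Nat)).natAbs := by omega
  have hq1 : 1 ≤ (m >>> (1 : Nat)).natAbs := by omega
  rcases lt_or_gt_of_ne hxne with hm | hm
  · have hmneg : m < 0 := by omega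
    rw [pv_band_pred_neg m hmneg, pv_band_pred_neg _ hm]
    have h4 : (m.natAbs - 1) ||| m.natAbs
        = 2 * (((m >>> (1 : Nat)).natAbs - 1) ||| (m >>> (1 : Nat)).natAbs) + 1 := by
      rw [hq]; exact pv_nat_or_pred_even _ hq1
    omega
  · have hmpos : 0 < m := by omega
    rw [pv_band_pred_pos m hmpos, pv_band_pred_pos _ hm]
    have h4 : m.natAbs &&& (m.natAbs - 1)
        = 2 * ((m >>> (1 : Nat)).natAbs &&& ((m >>> (1 : Nat)).natAbs - 1)) := by
      rw [hq]; exact pv_nat_and_pred_even _ hq1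
    omega

-- bitLength facts
theorem pv_bitLength_two_mul_pos (y : Int) (hy : 0 < y) :
    PySem.Int.bitLength (2 * y) = PySem.Int.bitLength y + 1 := by
  have h1 : (2 * y) = ((2 * y.toNat : Nat) : Int) := by omega
  have h2 : y = ((y.toNat : Nat) : Int) := by omega
  rw [h1, PySem.Int.bitLength_natCast (show 0 < 2 * y.toNat by omega),
    show 2 * y.toNat / 2 = y.toNat by omega, ← h2]

theorem pv_bitLength_two_mul (x : Int) (h : x ≠ 0) :
    PySem.Int.bitLength (2 * x) = PySem.Int.bitLength x + 1 := by
  rcases lt_or_gt_of_ne h with hx | hx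
  · calc PySem.Int.bitLength (2 * x) = PySem.Int.bitLength (-(2 * x)) :=
          (PySem.Int.bitLength_neg _).symm
      _ = PySem.Int.bitLength (2 * (-x)) := by ring_nf
      _ = PySem.Int.bitLength (-x) + 1 := pv_bitLength_two_mul_pos _ (by omega)
      _ = PySem.Int.bitLength x + 1 := by rw [PySem.Int.bitLength_neg]
  · exact pv_bitLength_two_mul_pos x hx

theorem pv_bitLength_pos (y : Int) (hy : 0 < y) : 1 ≤ PySem.Int.bitLength y := by
  rw [show y = ((y.toNat : Nat) : Int) by omega, PySem.Int.bitLength_natCast (by omega)]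
  omega

-- lowbit index
theorem pv_lowbit_odd (m : Int) (h : m % 2 = 1) : icLowbit m = 0 := by
  rw [icLowbit, pv_band_neg_self_odd m h]; decide

theorem pv_lowbit_even (m : Int) (h0 : m ≠ 0) (h : m % 2 = 0) :
    icLowbit m = icLowbit (m >>> (1 : Nat)) + 1 := by
  have hxne : m >>> (1 : Nat) ≠ 0 := pv_half_ne_zero m h0 h
  have hL : 0 < PySem.Int.band (m >>> (1 : Nat)) (-(m >>> (1 : Nat))) := pv_lowbit_pos _ hxne
  rw [icLowbit, icLowbit, pv_band_neg_self_even m h0 h, pv_bitLength_two_mul _ (by omega)]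
  have := pv_bitLength_pos _ hL
  omega

-- clearing the lowest set bit strictly increases the lowbit index
theorem pv_lowbit_clear_lt_aux (k : Nat) :
    ∀ m : Int, m.natAbs ≤ k → m ≠ 0 → PySem.Int.band m (m - 1) ≠ 0 →
      icLowbit m < icLowbit (PySem.Int.band m (m - 1)) := by
  induction k with
  | zero => intro m hm h0 _; omega
  | succ k ih =>
      intro m hm h0 hc
      by_cases hodd : m % 2 = 1
      · rw [pv_lowbit_odd m hodd]
        rw [pv_clear_odd m hodd] at hc ⊢
        rw [pv_lowbit_even _ hc (by omega)]
        omega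
      · have h : m % 2 = 0 := by omega
        have hxne : m >>> (1 : Nat) ≠ 0 := pv_half_ne_zero m h0 h
        have hx : m = 2 * (m >>> (1 : Nat)) := by have := pv_shr1_spec m; omega
        rw [pv_lowbit_even m h0 h, pv_clear_even m h0 h]
        rw [pv_clear_even m h0 h] at hc
        have hcx : PySem.Int.band (m >>> (1 : Nat)) ((m >>> (1 : Nat)) - 1) ≠ 0 := by
          intro e; rw [e] at hc; simp at hc
        have hl2 : icLowbit (2 * PySem.Int.band (m >>> (1 : Nat)) ((m >>> (1 : Nat)) - 1))
            = icLowbit (PySem.Int.band (m >>> (1 : Nat)) ((m >>> (1 : Nat)) - 1)) + 1 := by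
          rw [pv_lowbit_even _ (by intro e; exact hcx (by omega)) (by omega), pv_shr1_two_mul]
        rw [hl2]
        have := ih (m >>> (1 : Nat)) (by omega) hxne hcx
        omega

theorem pv_lowbit_clear_lt (m : Int) (h0 : m ≠ 0) (hc : PySem.Int.band m (m - 1) ≠ 0) :
    icLowbit m < icLowbit (PySem.Int.band m (m - 1)) :=
  pv_lowbit_clear_lt_aux m.natAbs m le_rfl h0 hc

theorem pvF_zero (seq : List Int) : pvF seq 0 = [] := by
  induction seq with
  | nil => rfl
  | cons u r ih =>
      rw [pvF, show ((0 : Int) >>> (1 : Nat)) = 0 from rfl, ih,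
        show PySem.Int.band 0 1 = 0 from rfl]
      simp

-- A's loop computes pvF
theorem icLoopA_eq (seq : List Int) (n : Int) (acc : List Int) :
    icLoopA seq n acc = acc ++ pvF seq n := by
  induction seq generalizing n acc with
  | nil => simp [icLoopA, pvF]
  | cons u r ih =>
      rw [icLoopA, pvF]
      by_cases hz : n >>> (1 : Nat) = 0
      · rw [if_pos hz, hz, pvF_zero]
        split_ifs <;> simp
      · rw [if_neg hz, ih]
        split_ifs <;> simp

-- the key characterisation of pvF via the lowest set bit
theorem pvF_lowbit (seq : List Int) (m : Int) (h : m ≠ 0) :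
    pvF seq m = if seq.length ≤ icLowbit m then []
                else seq.getD (icLowbit m) 0 :: pvF seq (PySem.Int.band m (m - 1)) := by
  induction seq generalizing m with
  | nil => simp [pvF]
  | cons u r ih =>
      by_cases hodd : m % 2 = 1
      · rw [pv_lowbit_odd m hodd, if_neg (by simp)]
        rw [pvF, pv_band_one_emod, if_pos (by omega), pv_clear_odd m hodd]
        rw [pvF, pv_band_one_emod, if_neg (by omega)]
        have he : m - 1 = 2 * (m >>> (1 : Nat)) := by have := pv_shr1_spec m; omega
        rw [he, pv_shr1_two_mul]
        simp
      · have h2 : m % 2 = 0 := by omega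
        have hxne : m >>> (1 : Nat) ≠ 0 := pv_half_ne_zero m h h2
        have hcl : PySem.Int.band
            (2 * PySem.Int.band (m >>> (1 : Nat)) ((m >>> (1 : Nat)) - 1)) 1 = 0 := by
          rw [pv_band_one_emod]; omega
        rw [pv_lowbit_even m h h2, pv_clear_even m h h2]
        rw [pvF, pv_band_one_emod, if_neg (by omega), ih _ hxne]
        rw [pvF, hcl, pv_shr1_two_mul]
        simp only [List.length_cons, List.getD_cons_succ, ne_eq, not_true_eq_false, if_false,
          List.nil_append, Nat.add_le_add_iff_right]

-- B's loop computes pvF, given enough fuel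
theorem icLoopB_eq (seq : List Int) (fuel : Nat) (m : Int) (acc : List Int)
    (hf : m ≠ 0 → seq.length ≤ fuel + icLowbit m) :
    icLoopB seq fuel m acc = acc ++ pvF seq m := by
  induction fuel generalizing m acc with
  | zero =>
      rw [icLoopB]
      by_cases hm : m = 0
      · rw [hm, pvF_zero]; simp
      · rw [pvF_lowbit seq m hm, if_pos (by have := hf hm; omega)]; simp
  | succ fuel ih =>
      rw [icLoopB]
      by_cases hm : m = 0
      · rw [if_pos hm, hm, pvF_zero]; simp
      · rw [if_neg hm]
        by_cases hlen : seq.length ≤ icLowbit m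
        · rw [if_pos hlen, pvF_lowbit seq m hm, if_pos hlen]; simp
        · rw [if_neg hlen, pvF_lowbit seq m hm, if_neg hlen]
          rw [ih _ _ ?_]
          · simp
          · intro hcne
            have := pv_lowbit_clear_lt m hm hcne
            have := hf hm
            omega

-- ===== VERDICT (by name: the statement is the Claim_ definition above) =====
theorem indexed_combination_spec : Claim_equal_indexed_combination := by
  intro seq n _
  unfold Spec_indexed_combination indexed_combination indexed_combination_alt
  rw [icLoopA_eq, icLoopB_eq]
  intro _
  omega
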